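-- pv_equiv track=rewrite | github.com/obiwit/100cerebros | Ano 3/IIA/G1_prog/lists_tuples.py | remove_count_elem
-- ===== SOURCE A (Python) =====
-- def remove_count_elem(list, elem):
-- 	if list == []:
-- 		return ([], 0)
--
-- 	rest_list, rest_count = remove_count_elem(list[1:], elem)
--
-- 	if list[0] == elem:
-- 		return rest_list, 1 + rest_count
-- 	else:
-- 		return [list[0]] + rest_list, rest_count
-- ===== SOURCE B (Python) =====
-- def remove_count_elem(list, elem):
--     result = []
--     count = 0
--     for x in list:
--         if x == elem:
--             count += 1
--         else:
--             result.append(x)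
--     return (result, count)
-- ===== Notes on version B (the rewrite author's own statement) =====
-- stated objective: simpler
-- what changed: Replaced recursion over list[1:] slices (quadratic copying, recursion-depth limited) with one explicit forward pass maintaining a result list and a counter.
import Mathlib
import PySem

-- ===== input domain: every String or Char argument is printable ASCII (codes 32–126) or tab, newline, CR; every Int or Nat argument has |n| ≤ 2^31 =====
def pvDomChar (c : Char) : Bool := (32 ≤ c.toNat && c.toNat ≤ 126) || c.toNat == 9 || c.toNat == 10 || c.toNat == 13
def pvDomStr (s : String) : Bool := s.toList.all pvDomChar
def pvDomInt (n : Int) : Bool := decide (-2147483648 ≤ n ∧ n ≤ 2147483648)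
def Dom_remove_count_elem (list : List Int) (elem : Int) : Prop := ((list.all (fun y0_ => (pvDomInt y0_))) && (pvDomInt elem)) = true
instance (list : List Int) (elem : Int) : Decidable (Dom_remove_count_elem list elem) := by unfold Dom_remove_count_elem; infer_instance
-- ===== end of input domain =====

-- ===== PORT A =====
def remove_count_elem (list : List Int) (elem : Int) : List Int × Int :=
  match list with
  | [] => ([], 0)
  | x :: rest =>
    let r := remove_count_elem rest elem
    if x == elem then (r.1, 1 + r.2) else ([x] ++ r.1, r.2)

-- ===== PORT B =====
def remove_count_elem_alt (list : List Int) (elem : Int) : List Int × Int :=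
  let st := list.foldl (fun (acc : List Int × Int) x =>
    if x == elem then (acc.1, acc.2 + 1) else (acc.1 ++ [x], acc.2)) ([], 0)
  (st.1, st.2)

-- ===== PRECONDITION & SPEC =====
def Spec_remove_count_elem (list : List Int) (elem : Int) (out : List Int × Int) : Prop := out = remove_count_elem_alt list elem
instance (list : List Int) (elem : Int) (out : List Int × Int) : Decidable (Spec_remove_count_elem list elem out) := by unfold Spec_remove_count_elem; infer_instance

-- ===== CLAIM (what is proved, stated in full; the proofs are below) =====
def Claim_equal_remove_count_elem : Prop := ∀ (list : List Int) (elem : Int), Dom_remove_count_elem list elem → Spec_remove_count_elem list elem (remove_count_elem list elem)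

-- ===== LEMMAS AND PROOFS =====

-- ===== VERDICT (by name: the statement is the Claim_ definition above) =====
theorem alt_foldl_acc (l : List Int) (e : Int) (acc : List Int) (c : Int) :
    l.foldl (fun (acc : List Int × Int) x =>
      if x == e then (acc.1, acc.2 + 1) else (acc.1 ++ [x], acc.2)) (acc, c)
      = (acc ++ (remove_count_elem l e).1, c + (remove_count_elem l e).2) := by
  induction l generalizing acc c with
  | nil => simp [remove_count_elem]
  | cons x rest ih =>
    simp only [List.foldl_cons, remove_count_elem]
    by_cases h : x = e
    · have hb : (x == e) = true := by simp [h]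
      simp only [hb, if_true]
      rw [ih]
      refine Prod.ext rfl ?_
      omega
    · have hb : (x == e) = false := by simp [h]
      simp only [hb, Bool.false_eq_true, if_false]
      rw [ih]
      simp

theorem remove_count_elem_spec : Claim_equal_remove_count_elem := by
  intro l e _
  unfold Spec_remove_count_elem remove_count_elem_alt
  rw [alt_foldl_acc l e [] 0]
  simp
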